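-- pv_equiv track=rewrite | github.com/marmelab/quixo-python | src/moves.py | move_row
-- ===== SOURCE A (Python) =====
-- from copy import deepcopy
--
-- def move_row(board, row, y_start, y_end, value):
--     board_copy = deepcopy(board)
--
--     step = -1 if y_end > y_start else 1
--     index_start = y_start - 1 if y_end > y_start else y_start + 1
--     for y in range(y_end, index_start, step):
--         prevVal = board_copy[row][y]
--         board_copy[row][y] = value
--         value = prevVal
--
--     return board_copy
-- ===== SOURCE B (Python) =====
-- from copy import deepcopy
--
-- def move_row(board, row, y_start, y_end, value):
--     board_copy = deepcopy(board)
--     r = board_copy[row]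
--     r.pop(y_start)
--     r.insert(y_end, value)
--     return board_copy
-- ===== Notes on version B (the rewrite author's own statement) =====
-- stated objective: simpler
-- what changed: replaces A's element-by-element carry loop (save cell, overwrite, carry the old value across the range) with a single r.pop(y_start) followed by r.insert(y_end, value) on the copied row
-- outside the precondition, e.g. on move_row([[1, 2, 3]], 0, -1, 0, 9): A returns [[9, 2, 1]], B returns [[9, 1, 2]]
import Mathlib
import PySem

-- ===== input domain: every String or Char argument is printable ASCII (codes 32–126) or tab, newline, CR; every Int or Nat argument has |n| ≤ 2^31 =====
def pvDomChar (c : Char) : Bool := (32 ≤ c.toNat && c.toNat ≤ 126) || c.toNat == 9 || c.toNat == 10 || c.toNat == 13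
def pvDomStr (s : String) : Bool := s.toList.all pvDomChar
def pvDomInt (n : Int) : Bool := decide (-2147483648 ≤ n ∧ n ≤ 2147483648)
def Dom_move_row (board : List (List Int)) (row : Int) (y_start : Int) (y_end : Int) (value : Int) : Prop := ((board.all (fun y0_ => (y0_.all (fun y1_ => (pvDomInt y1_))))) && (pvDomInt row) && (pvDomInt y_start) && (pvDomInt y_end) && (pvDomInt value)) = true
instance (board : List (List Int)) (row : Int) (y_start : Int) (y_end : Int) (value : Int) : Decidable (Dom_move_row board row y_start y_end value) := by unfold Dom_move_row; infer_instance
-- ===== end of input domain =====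

-- B replaces A's element-by-element carry loop with one pop(y_start) + insert(y_end, value) (simpler); both
-- Pythons mutate only a deepcopy, so the return value is the whole observable behaviour.

-- ===== PORT A =====
def move_row (board : List (List Int)) (row : Int) (y_start : Int) (y_end : Int) (value : Int) : List (List Int) :=
  let step : Int := if y_end > y_start then -1 else 1
  let index_start : Int := if y_end > y_start then y_start - 1 else y_start + 1
  -- prevVal = board_copy[row][y]; board_copy[row][y] = value — pyGetD/pySetD are exact under Pre_ (all indices in range)
  ((PySem.List.pyRange y_end index_start step).foldl
    (fun (st : List (List Int) × Int) y =>
      (PySem.List.pySetD st.1 row (PySem.List.pySetD (PySem.List.pyGetD st.1 row []) y st.2),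
       PySem.List.pyGetD (PySem.List.pyGetD st.1 row []) y 0))
    (board, value)).1

-- ===== PORT B =====
def move_row_alt (board : List (List Int)) (row : Int) (y_start : Int) (y_end : Int) (value : Int) : List (List Int) :=
  let r := PySem.List.pyGetD board row []                                -- board_copy[row]; exact under Pre_
  let r1 := ((PySem.List.pop? r y_start).map Prod.snd).getD r            -- r.pop(y_start); exact under Pre_ (index in range)
  let r2 := PySem.List.insert r1 y_end value                             -- r.insert(y_end, value)
  PySem.List.pySetD board row r2

-- ===== PRECONDITION & SPEC =====
-- Pre_ excludes out-of-range and negative row/column indices: there A mostly raises IndexError, and on the few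
-- such inputs where Python's negative-index wraparound lets A return, the result (shift direction read off the raw
-- signed indices) is a corner no caller of a board-move function specifies, and B's pop/insert does its own
-- (different) natural thing there.
def Pre_move_row (board : List (List Int)) (row : Int) (y_start : Int) (y_end : Int) (value : Int) : Prop :=
  0 ≤ row ∧ row < (board.length : Int) ∧ 0 ≤ y_start ∧ 0 ≤ y_end ∧
  y_start < ((board.getD row.toNat []).length : Int) ∧ y_end < ((board.getD row.toNat []).length : Int)
instance (board : List (List Int)) (row : Int) (y_start : Int) (y_end : Int) (value : Int) : Decidable (Pre_move_row board row y_start y_end value) := by unfold Pre_move_row; infer_instance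

def pvWitness_move_row : List (List Int) × Int × Int × Int × Int := ([[1, 2, 3], [4, 5, 6]], 1, 0, 2, 9)

def Spec_move_row (board : List (List Int)) (row : Int) (y_start : Int) (y_end : Int) (value : Int) (out : List (List Int)) : Prop := out = move_row_alt board row y_start y_end value
instance (board : List (List Int)) (row : Int) (y_start : Int) (y_end : Int) (value : Int) (out : List (List Int)) : Decidable (Spec_move_row board row y_start y_end value out) := by unfold Spec_move_row; infer_instance

-- ===== CLAIM (what is proved, stated in full; the proofs are below) =====
def Claim_equal_move_row : Prop := ∀ (board : List (List Int)) (row : Int) (y_start : Int) (y_end : Int) (value : Int), Dom_move_row board row y_start y_end value → Pre_move_row board row y_start y_end value → Spec_move_row board row y_start y_end value (move_row board row y_start y_end value)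

-- ===== LEMMAS AND PROOFS =====

-- one iteration of A's carry loop, restricted to the row it works on
def rowStep (st : List Int × Int) (y : Int) : List Int × Int :=
  (PySem.List.pySetD st.1 y st.2, PySem.List.pyGetD st.1 y 0)

-- A's fold touches only row n of the board: it is `set n` of a row-level fold
lemma boardFold (l : List Int) (bc : List (List Int)) (n : Nat) (hn : n < bc.length) (v : Int) :
    (l.foldl
      (fun (st : List (List Int) × Int) y =>
        (PySem.List.pySetD st.1 (n : Int) (PySem.List.pySetD (PySem.List.pyGetD st.1 (n : Int) []) y st.2),
         PySem.List.pyGetD (PySem.List.pyGetD st.1 (n : Int) []) y 0))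
      (bc, v))
    = (bc.set n (l.foldl rowStep (bc.getD n [], v)).1, (l.foldl rowStep (bc.getD n [], v)).2) := by
  induction l generalizing bc v with
  | nil =>
    simp only [List.foldl_nil]
    rw [List.getD_eq_getElem bc [] hn, List.set_getElem_self]
  | cons y t ih =>
    rw [List.foldl_cons]; dsimp only
    have h1 : (PySem.List.pySetD bc (n : Int) (PySem.List.pySetD (PySem.List.pyGetD bc (n : Int) []) y v),
         PySem.List.pyGetD (PySem.List.pyGetD bc (n : Int) []) y 0)
        = (bc.set n (rowStep (bc.getD n [], v) y).1, (rowStep (bc.getD n [], v) y).2) := by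
      simp [rowStep]
    rw [h1, ih _ (by simpa using hn)]
    rw [List.getD_eq_getElem (bc.set n (rowStep (bc.getD n [], v) y).1) [] (by simpa using hn),
        List.getElem_set_self, List.set_set, List.foldl_cons]

-- descending carry loop = shift the segment [ys, ys+d] one cell down and put v at its top
lemma rowDesc (d : Nat) : ∀ (ys : Nat) (r : List Int) (v : Int), ys + d < r.length →
    ((PySem.List.pyRange ((ys + d : Nat) : Int) ((ys : Int) - 1) (-1)).foldl rowStep (r, v))
    = (r.take ys ++ ((r.drop (ys + 1)).take d ++ [v]) ++ r.drop (ys + d + 1), r.getD ys 0) := by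
  induction d with
  | zero =>
    intro ys r v h
    rw [PySem.List.pyRange_neg_one_cons (by push_cast; omega),
        PySem.List.pyRange_neg_one_eq_nil (by push_cast; omega)]
    simp only [List.foldl_cons, List.foldl_nil, rowStep, Nat.add_zero,
      PySem.List.pySetD_natCast, PySem.List.pyGetD_natCast]
    rw [List.set_eq_take_append_cons_drop]
    simp only [List.take_zero, List.nil_append]
    rw [if_pos (by omega : ys < r.length)]
    simp
  | succ d ih =>
    intro ys r v h
    rw [PySem.List.pyRange_neg_one_cons (by push_cast; omega)]
    rw [List.foldl_cons]
    have hc : ((ys + (d+1) : Nat) : Int) - 1 = ((ys + d : Nat) : Int) := by push_cast; omega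
    rw [hc]
    have hstep : rowStep (r, v) ((ys + (d+1) : Nat) : Int)
        = (r.set (ys + (d+1)) v, r.getD (ys + (d+1)) 0) := by
      simp only [rowStep, PySem.List.pySetD_natCast, PySem.List.pyGetD_natCast]
    rw [hstep, ih ys _ _ (by rw [List.length_set]; omega)]
    have h1 : (r.set (ys + (d+1)) v).take ys = r.take ys := List.take_set_of_le (by omega)
    have h2 : (r.set (ys + (d+1)) v).drop (ys + 1) = (r.drop (ys + 1)).set d v := by
      rw [List.drop_set, if_neg (by omega)]
      congr 1; omega
    have h3 : ((r.drop (ys + 1)).set d v).take d = (r.drop (ys + 1)).take d := by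
      rw [List.take_set, List.set_eq_of_length_le (by simp)]
    have h4 : (r.set (ys + (d+1)) v).drop (ys + d + 1) = v :: r.drop (ys + d + 2) := by
      rw [List.drop_set, if_neg (by omega)]
      have : ys + (d+1) - (ys + d + 1) = 0 := by omega
      rw [this, List.drop_eq_getElem_cons (by omega : ys + d + 1 < r.length), List.set_cons_zero]
    have h5 : (r.set (ys + (d+1)) v).getD ys 0 = r.getD ys 0 := by
      rw [List.getD_eq_getElem?_getD, List.getElem?_set_ne (by omega), List.getD_eq_getElem?_getD]
    have h6 : (r.drop (ys + 1)).take (d + 1) = (r.drop (ys + 1)).take d ++ [r.getD (ys + (d+1)) 0] := by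
      rw [List.take_add_one, List.getElem?_drop, List.getD_eq_getElem?_getD,
          List.getElem?_eq_getElem (by omega : ys + 1 + d < r.length)]
      have : ys + (d+1) = ys + 1 + d := by omega
      rw [this, List.getElem?_eq_getElem (by omega : ys + 1 + d < r.length)]
      rfl
    rw [h1, h2, h3, h4, h5, h6]
    have h7 : ys + (d + 1) + 1 = ys + d + 2 := by omega
    rw [h7]
    simp [List.append_assoc]

-- ascending carry loop = put v at the bottom of the segment [ye, ye+d] and shift it one cell up
lemma rowAsc (d : Nat) : ∀ (ye : Nat) (r : List Int) (v : Int), ye + d < r.length →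
    ((PySem.List.pyRange ((ye : Nat) : Int) (((ye + d : Nat) : Int) + 1) 1).foldl rowStep (r, v))
    = (r.take ye ++ ([v] ++ (r.drop ye).take d) ++ r.drop (ye + d + 1), r.getD (ye + d) 0) := by
  induction d with
  | zero =>
    intro ye r v h
    have hb : ((ye + 0 : Nat) : Int) + 1 = (ye : Int) + 1 := by push_cast; omega
    rw [hb, PySem.List.pyRange_one_singleton]
    simp only [List.foldl_cons, List.foldl_nil, rowStep, Nat.add_zero,
      PySem.List.pySetD_natCast, PySem.List.pyGetD_natCast]
    rw [List.set_eq_take_append_cons_drop, if_pos (by omega : ye < r.length)]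
    simp
  | succ d ih =>
    intro ye r v h
    rw [PySem.List.pyRange_one_cons (by push_cast; omega), List.foldl_cons]
    have hc : (ye : Int) + 1 = (((ye + 1 : Nat)) : Int) := by push_cast; omega
    have hc2 : (((ye + (d+1) : Nat)) : Int) + 1 = ((((ye + 1) + d : Nat)) : Int) + 1 := by push_cast; omega
    rw [hc, hc2]
    have hstep : rowStep (r, v) ((ye : Nat) : Int) = (r.set ye v, r.getD ye 0) := by
      simp only [rowStep, PySem.List.pySetD_natCast, PySem.List.pyGetD_natCast]
    rw [hstep, ih (ye + 1) _ _ (by rw [List.length_set]; omega)]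
    have h1 : (r.set ye v).take (ye + 1) = r.take ye ++ [v] := by
      rw [List.take_add_one, List.take_set_of_le (le_refl ye),
          List.getElem?_set_self (by omega : ye < r.length)]
      rfl
    have h2 : (r.set ye v).drop (ye + 1) = r.drop (ye + 1) := by
      rw [List.drop_set, if_pos (by omega)]
    have h3 : (r.set ye v).drop (ye + 1 + d + 1) = r.drop (ye + (d + 1) + 1) := by
      rw [List.drop_set, if_pos (by omega)]
      congr 1; omega
    have h4 : (r.set ye v).getD (ye + 1 + d) 0 = r.getD (ye + (d + 1)) 0 := by
      rw [List.getD_eq_getElem?_getD, List.getElem?_set_ne (by omega), List.getD_eq_getElem?_getD]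
      congr 2; omega
    have h5 : [r.getD ye 0] ++ (r.drop (ye + 1)).take d = (r.drop ye).take (d + 1) := by
      rw [List.drop_eq_getElem_cons (by omega : ye < r.length), List.take_succ_cons,
          List.getD_eq_getElem?_getD, List.getElem?_eq_getElem (by omega : ye < r.length)]
      rfl
    rw [h1, h2, h3, h4]
    rw [← h5]
    simp [List.append_assoc]

-- B's pop(y_start)+insert(y_end, v), written out, is A's shifted-segment form (descending case)
lemma insertErase_desc (r : List Int) (s e : Nat) (v : Int) (hs : s < r.length) (he : e < r.length)
    (hes : s < e) :
    PySem.List.insert (r.eraseIdx s) ((e : Nat) : Int) v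
    = r.take s ++ ((r.drop (s + 1)).take (e - s) ++ [v]) ++ r.drop (s + (e - s) + 1) := by
  rw [PySem.List.insert_natCast _ _ _ (by rw [List.length_eraseIdx_of_lt hs]; omega),
      List.eraseIdx_eq_take_drop_succ, List.take_append, List.drop_append]
  have h1 : (r.take s).take e = r.take s := List.take_of_length_le (by simp; omega)
  have h2 : (r.take s).drop e = [] := List.drop_eq_nil_of_le (by simp; omega)
  have h3 : (r.take s).length = s := by simp; omega
  rw [h1, h2, h3]
  have h4 : s + (e - s) + 1 = e + 1 := by omega
  rw [h4, List.drop_drop]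
  have h5 : s + 1 + (e - s) = e + 1 := by omega
  rw [h5]
  simp [List.append_assoc]

-- and the ascending case
lemma insertErase_asc (r : List Int) (s e : Nat) (v : Int) (hs : s < r.length) (he : e < r.length)
    (hse : e ≤ s) :
    PySem.List.insert (r.eraseIdx s) ((e : Nat) : Int) v
    = r.take e ++ ([v] ++ (r.drop e).take (s - e)) ++ r.drop (e + (s - e) + 1) := by
  rw [PySem.List.insert_natCast _ _ _ (by rw [List.length_eraseIdx_of_lt hs]; omega),
      List.eraseIdx_eq_take_drop_succ, List.take_append, List.drop_append]
  have h1 : (r.take s).take e = r.take e := List.take_take.trans (by rw [Nat.min_eq_left hse])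
  have h2 : (r.take s).drop e = (r.drop e).take (s - e) := List.drop_take
  have h3 : (r.take s).length = s := by simp; omega
  rw [h1, h2, h3]
  have h4 : e - s = 0 := by omega
  have h5 : e + (s - e) + 1 = s + 1 := by omega
  rw [h4, h5]
  simp [List.append_assoc]

lemma move_row_eq_alt (board : List (List Int)) (row y_start y_end value : Int)
    (h0 : 0 ≤ row) (h1 : row < (board.length : Int)) (h2 : 0 ≤ y_start) (h3 : 0 ≤ y_end)
    (h4 : y_start < ((board.getD row.toNat []).length : Int))
    (h5 : y_end < ((board.getD row.toNat []).length : Int)) :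
    move_row board row y_start y_end value = move_row_alt board row y_start y_end value := by
  obtain ⟨n, rfl⟩ : ∃ n : Nat, row = (n : Int) := ⟨row.toNat, (Int.toNat_of_nonneg h0).symm⟩
  obtain ⟨s, rfl⟩ : ∃ s : Nat, y_start = (s : Int) := ⟨y_start.toNat, (Int.toNat_of_nonneg h2).symm⟩
  obtain ⟨e, rfl⟩ : ∃ e : Nat, y_end = (e : Int) := ⟨y_end.toNat, (Int.toNat_of_nonneg h3).symm⟩
  rw [Int.toNat_natCast] at h4 h5
  have hn : n < board.length := by exact_mod_cast h1
  have hs : s < (board.getD n []).length := by exact_mod_cast h4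
  have he : e < (board.getD n []).length := by exact_mod_cast h5
  unfold move_row move_row_alt
  by_cases hgt : (e : Int) > (s : Int)
  · have hes : s < e := by exact_mod_cast hgt
    simp only [if_pos hgt]
    have hd : ((e : Nat) : Int) = ((s + (e - s) : Nat) : Int) := by push_cast; omega
    conv_lhs => rw [hd]
    rw [boardFold _ _ _ hn]
    conv_lhs => rw [rowDesc (e - s) s _ value (by omega)]
    rw [PySem.List.pySetD_natCast, PySem.List.pyGetD_natCast,
        PySem.List.pop?_natCast _ _ hs]
    simp only [Option.map_some, Option.getD_some]
    rw [insertErase_desc _ _ _ value hs he hes]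
  · have hse : e ≤ s := by omega
    simp only [if_neg hgt]
    have hd : ((s : Int) + 1) = ((e + (s - e) : Nat) : Int) + 1 := by push_cast; omega
    conv_lhs => rw [hd]
    rw [boardFold _ _ _ hn]
    conv_lhs => rw [rowAsc (s - e) e _ value (by omega)]
    rw [PySem.List.pySetD_natCast, PySem.List.pyGetD_natCast,
        PySem.List.pop?_natCast _ _ hs]
    simp only [Option.map_some, Option.getD_some]
    rw [insertErase_asc _ _ _ value hs he hse]

-- ===== VERDICT (by name: the statement is the Claim_ definition above) =====
theorem move_row_spec : Claim_equal_move_row := by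
  intro board row y_start y_end value _ hpre
  obtain ⟨h0, h1, h2, h3, h4, h5⟩ := hpre
  exact move_row_eq_alt board row y_start y_end value h0 h1 h2 h3 h4 h5
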